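-- pv_equiv track=rewrite | github.com/Zahramohamed-eng/count-pairs-algorithm | naive.py | count_pairs_naive
-- ===== SOURCE A (Python) =====
-- def count_pairs_naive(arr, L, R):
--     count = 0
--     n = len(arr)
--     for i in range(n):
--         for j in range(i + 1, n):
--             if L <= arr[i] + arr[j] <= R:
--                 count += 1
--     return count
-- ===== SOURCE B (Python) =====
-- def _bisect_left(a, x):
--     lo, hi = 0, len(a)
--     while lo < hi:
--         mid = (lo + hi) // 2
--         if a[mid] < x:
--             lo = mid + 1
--         else:
--             hi = mid
--     return lo
--
--
-- def _bisect_right(a, x):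
--     lo, hi = 0, len(a)
--     while lo < hi:
--         mid = (lo + hi) // 2
--         if x < a[mid]:
--             hi = mid
--         else:
--             lo = mid + 1
--     return lo
--
--
-- def count_pairs_naive(arr, L, R):
--     if L > R:
--         return 0
--     a = sorted(arr)
--     total = 0
--     for x in a:
--         # ordered partners y (anywhere in a) with L <= x + y <= R
--         total += _bisect_right(a, R - x) - _bisect_left(a, L - x)
--         # remove the self-pairing (x with its own position)
--         if L <= 2 * x <= R:
--             total -= 1
--     return total // 2  # each unordered pair was counted twice
-- ===== Notes on version B (the rewrite author's own statement) =====
-- stated objective: faster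
-- what changed: Replaces the O(n^2) double loop by sorting the array once and, for each element, binary-searching (bisect) the count of partners whose sum lands in [L,R], correcting for self-pairs and halving the double count.
import Mathlib
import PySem

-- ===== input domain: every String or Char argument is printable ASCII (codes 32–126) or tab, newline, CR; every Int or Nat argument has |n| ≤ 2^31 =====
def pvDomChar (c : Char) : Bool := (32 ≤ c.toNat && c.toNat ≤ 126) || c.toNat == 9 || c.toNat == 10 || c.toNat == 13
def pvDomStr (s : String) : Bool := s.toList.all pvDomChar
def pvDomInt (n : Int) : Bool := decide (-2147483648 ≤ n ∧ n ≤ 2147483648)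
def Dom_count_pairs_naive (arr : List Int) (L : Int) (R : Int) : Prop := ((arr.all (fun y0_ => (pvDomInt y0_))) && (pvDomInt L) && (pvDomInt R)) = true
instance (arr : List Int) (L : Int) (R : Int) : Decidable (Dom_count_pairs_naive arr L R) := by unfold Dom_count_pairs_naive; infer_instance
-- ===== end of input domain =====

-- B replaces A's O(n^2) double loop by sort + bisect counting of partners, self-pair correction and halving (return value only).


-- ===== PORT A =====
def count_pairs_naive (arr : List Int) (L : Int) (R : Int) : Int :=
  let n : Int := PySem.List.len arr
  (PySem.List.pyRange 0 n).foldl (fun count i =>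
    (PySem.List.pyRange (i + 1) n).foldl (fun count j =>
      if L ≤ PySem.List.pyGetD arr i 0 + PySem.List.pyGetD arr j 0 ∧
         PySem.List.pyGetD arr i 0 + PySem.List.pyGetD arr j 0 ≤ R then count + 1 else count)
      count) 0

-- ===== PORT B =====
-- _bisect_left/_bisect_right in Source B are the standard CPython bisect loops; they are ported
-- as PySem.List.bisectLeft / bisectRight, whose definitions are exactly that loop.
def count_pairs_naive_alt (arr : List Int) (L : Int) (R : Int) : Int :=
  if L > R then 0
  else
    let a := PySem.List.sorted arr id
    let total := a.foldl (fun total x =>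
      let t := total + ((PySem.List.bisectRight a (R - x) : Int) - (PySem.List.bisectLeft a (L - x) : Int))
      if L ≤ 2 * x ∧ 2 * x ≤ R then t - 1 else t) 0
    PySem.Int.floordiv total 2

-- ===== PRECONDITION & SPEC =====
def Spec_count_pairs_naive (arr : List Int) (L : Int) (R : Int) (out : Int) : Prop := out = count_pairs_naive_alt arr L R
instance (arr : List Int) (L : Int) (R : Int) (out : Int) : Decidable (Spec_count_pairs_naive arr L R out) := by unfold Spec_count_pairs_naive; infer_instance

-- ===== CLAIM (what is proved, stated in full; the proofs are below) =====
def Claim_equal_count_pairs_naive : Prop := ∀ (arr : List Int) (L : Int) (R : Int), Dom_count_pairs_naive arr L R → Spec_count_pairs_naive arr L R (count_pairs_naive arr L R)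

-- ===== LEMMAS AND PROOFS =====

/-- The pair predicate: the sum of the two elements lies in [L, R]. -/
def pvP (L R x y : Int) : Bool := decide (L ≤ x + y) && decide (x + y ≤ R)

/-- Number of unordered pairs (i < j) whose elements satisfy p. -/
def pairCount (p : Int → Int → Bool) : List Int → Nat
  | [] => 0
  | x :: xs => xs.countP (p x) + pairCount p xs

lemma pvP_symm (L R x y : Int) : pvP L R x y = pvP L R y x := by
  simp [pvP, Int.add_comm]

-- ---- A reduces to pairCount ----

lemma sum_gA (p : Int → Int → Bool) (l : List Int) :
    (((List.range l.length).map
        (fun k => ((l.drop (k + 1)).countP (p (l.getD k 0)) : Int))).sum)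
      = (pairCount p l : Int) := by
  induction l with
  | nil => simp [pairCount]
  | cons x xs ih =>
    rw [List.length_cons, List.range_succ_eq_map]
    simp only [List.map_cons, List.map_map, List.sum_cons]
    have hfun : ((fun k => (((x :: xs).drop (k + 1)).countP (p ((x :: xs).getD k 0)) : Int)) ∘ Nat.succ)
        = fun k => ((xs.drop (k + 1)).countP (p (xs.getD k 0)) : Int) := by
      funext k
      simp [List.drop_succ_cons]
    rw [hfun, ih]
    simp [pairCount]

lemma A_eq_pairCount (arr : List Int) (L R : Int) :
    count_pairs_naive arr L R = (pairCount (pvP L R) arr : Int) := by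
  unfold count_pairs_naive
  simp only []
  rw [PySem.List.foldl_congr_mem _ _
    (fun count i => count + ((arr.drop (i + 1).toNat).countP (pvP L R (PySem.List.pyGetD arr i 0)) : Int)) 0 ?_]
  · rw [PySem.List.foldl_add, PySem.List.pyRange_one]
    simp only [List.map_map, Int.zero_add, Int.sub_zero]
    have hlen : ((PySem.List.len arr : Int)).toNat = arr.length := by
      simp [PySem.List.len]
    rw [hlen, ← sum_gA (pvP L R) arr]
    congr 1
    apply List.map_congr_left
    intro k _
    simp only [Function.comp_apply]
    have hk : ((k:Int) + 1).toNat = k + 1 := by omega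
    rw [hk, PySem.List.pyGetD_natCast]
  · intro acc i hi
    rw [PySem.List.mem_pyRange_one] at hi
    have h01 : (0:Int) ≤ i + 1 := by omega
    have hfold := PySem.List.foldl_pyRange_pyGetD arr 0
      (fun c y => if L ≤ PySem.List.pyGetD arr i 0 + y ∧ PySem.List.pyGetD arr i 0 + y ≤ R then c + 1 else c)
      acc h01
    rw [hfold]
    have hfun : (fun (c : Int) y => if L ≤ PySem.List.pyGetD arr i 0 + y ∧ PySem.List.pyGetD arr i 0 + y ≤ R then c + 1 else c)
        = fun c y => if pvP L R (PySem.List.pyGetD arr i 0) y = true then c + 1 else c := by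
      funext c y
      simp [pvP]
    rw [hfun, PySem.List.foldl_count_if]

-- ---- pairCount is invariant under permutation (for symmetric p) ----

lemma pairCount_perm (p : Int → Int → Bool) (hsym : ∀ x y, p x y = p y x)
    {l l' : List Int} (h : l.Perm l') : pairCount p l = pairCount p l' := by
  induction h with
  | nil => rfl
  | cons x h ih => simp [pairCount, ih, h.countP_eq]
  | swap x y l =>
    simp only [pairCount, List.countP_cons]
    rw [hsym y x]
    ring
  | trans h₁ h₂ ih₁ ih₂ => exact ih₁.trans ih₂

-- ---- bisect counts on a sorted list ----

lemma bisectRight_eq_countP (s : List Int) (c : Int)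
    (hs : s.Pairwise (· ≤ ·)) :
    (PySem.List.bisectRight s c : Nat) = s.countP (fun y => decide (y ≤ c)) := by
  obtain ⟨h1, h2, h3⟩ := PySem.List.bisectRight_spec s c hs
  set n := PySem.List.bisectRight s c with hn
  conv_rhs => rw [← List.take_append_drop n s]
  rw [List.countP_append]
  have ht : (s.take n).countP (fun y => decide (y ≤ c)) = n := by
    rw [List.countP_eq_length.mpr, List.length_take_of_le h1]
    intro a ha
    rw [List.mem_take_iff_getElem] at ha
    obtain ⟨i, hi, rfl⟩ := ha
    simp only [decide_eq_true_eq]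
    exact h2 i (by omega) (by omega)
  have hd : (s.drop n).countP (fun y => decide (y ≤ c)) = 0 := by
    rw [List.countP_eq_zero]
    intro a ha
    rw [List.mem_drop_iff_getElem] at ha
    obtain ⟨i, hi, rfl⟩ := ha
    simp only [decide_eq_true_eq]
    have := h3 (n + i) (by omega) (by omega)
    omega
  omega

lemma bisectLeft_eq_countP (s : List Int) (c : Int)
    (hs : s.Pairwise (· ≤ ·)) :
    (PySem.List.bisectLeft s c : Nat) = s.countP (fun y => decide (y < c)) := by
  obtain ⟨h1, h2, h3⟩ := PySem.List.bisectLeft_spec s c hs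
  set n := PySem.List.bisectLeft s c with hn
  conv_rhs => rw [← List.take_append_drop n s]
  rw [List.countP_append]
  have ht : (s.take n).countP (fun y => decide (y < c)) = n := by
    rw [List.countP_eq_length.mpr, List.length_take_of_le h1]
    intro a ha
    rw [List.mem_take_iff_getElem] at ha
    obtain ⟨i, hi, rfl⟩ := ha
    simp only [decide_eq_true_eq]
    exact h2 i (by omega) (by omega)
  have hd : (s.drop n).countP (fun y => decide (y < c)) = 0 := by
    rw [List.countP_eq_zero]
    intro a ha
    rw [List.mem_drop_iff_getElem] at ha
    obtain ⟨i, hi, rfl⟩ := ha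
    simp only [decide_eq_true_eq]
    have := h3 (n + i) (by omega) (by omega)
    omega
  omega

-- ---- countP subtraction ----

lemma countP_split (q r : Int → Bool) (himp : ∀ y, q y = true → r y = true) (l : List Int) :
    l.countP r = l.countP q + l.countP (fun y => r y && !q y) := by
  induction l with
  | nil => simp
  | cons x xs ih =>
    simp only [List.countP_cons, ih]
    by_cases hq : q x = true
    · simp [hq, himp x hq]; omega
    · simp at hq; simp [hq]; omega

-- ---- the symmetric double-count identity ----

lemma sum_countP_eq (p : Int → Int → Bool) (hsym : ∀ x y, p x y = p y x) (l : List Int) :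
    ((l.map (fun x => (l.countP (p x) : Int))).sum)
      = 2 * (pairCount p l : Int) + (l.countP (fun x => p x x) : Int) := by
  induction l with
  | nil => simp [pairCount]
  | cons x xs ih =>
    simp only [List.map_cons, List.sum_cons]
    have hmap : xs.map (fun y => ((x :: xs).countP (p y) : Int))
        = xs.map (fun y => (if p y x then (1:Int) else 0) + (xs.countP (p y) : Int)) := by
      apply List.map_congr_left; intro y _
      rw [List.countP_cons]
      by_cases h : p y x = true <;> simp [h] <;> push_cast <;> ring
    rw [hmap]
    have hsplit : (xs.map (fun y => (if p y x then (1:Int) else 0) + (xs.countP (p y) : Int))).sum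
        = (xs.map (fun y => (if p y x then (1:Int) else 0))).sum
          + (xs.map (fun y => (xs.countP (p y) : Int))).sum := by
      rw [← List.sum_map_add]
    rw [hsplit, ih]
    have hind : (xs.map (fun y => (if p y x then (1:Int) else 0))).sum
        = (xs.countP (fun y => p y x) : Int) := by
      have := PySem.List.sum_map_ite_one_zero (fun y => p y x) xs
      simpa using this
    rw [hind]
    have hsy : xs.countP (fun y => p y x) = xs.countP (p x) := by
      apply List.countP_congr; intro y _; rw [hsym y x]
    rw [hsy, List.countP_cons, List.countP_cons]
    simp only [pairCount]
    by_cases hx : p x x = true <;> simp [hx] <;> push_cast <;> ring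

-- ---- B reduces to pairCount ----

lemma pairCount_of_false (p : Int → Int → Bool) (hf : ∀ x y, p x y = false) (l : List Int) :
    pairCount p l = 0 := by
  induction l with
  | nil => rfl
  | cons x xs ih =>
    have h0 : List.countP (p x) xs = 0 := List.countP_eq_zero.mpr (fun a _ => by rw [hf x a]; simp)
    simp [pairCount, ih, h0]

lemma B_eq_pairCount (arr : List Int) (L R : Int) :
    count_pairs_naive_alt arr L R = (pairCount (pvP L R) arr : Int) := by
  unfold count_pairs_naive_alt
  by_cases hLR : L > R
  · rw [if_pos hLR, pairCount_of_false (pvP L R) (fun x y => by simp [pvP]; omega) arr]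
    simp
  · rw [if_neg hLR]
    have hLR' : L ≤ R := by omega
    set s := PySem.List.sorted arr id with hsdef
    have hs : s.Pairwise (· ≤ ·) := by
      have := PySem.List.sorted_pairwise arr id
      simpa using this
    have hperm : s.Perm arr := PySem.List.sorted_perm arr id false
    simp only []
    rw [PySem.List.foldl_congr_mem _ _
      (fun total x => total +
        (((PySem.List.bisectRight s (R - x) : Int) - (PySem.List.bisectLeft s (L - x) : Int))
          - (if pvP L R x x then 1 else 0))) 0 ?_]
    · rw [PySem.List.foldl_add]
      have hmap : s.map (fun x =>
          (((PySem.List.bisectRight s (R - x) : Int) - (PySem.List.bisectLeft s (L - x) : Int))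
            - (if pvP L R x x then 1 else 0)))
          = s.map (fun x => ((s.countP (pvP L R x) : Int) + ((if pvP L R x x then (-1:Int) else 0)))) := by
        apply List.map_congr_left
        intro x _
        rw [bisectRight_eq_countP s (R - x) hs, bisectLeft_eq_countP s (L - x) hs]
        have hsplit := countP_split (fun y => decide (y < L - x)) (fun y => decide (y ≤ R - x))
          (fun y hy => by simp at hy ⊢; omega) s
        have hco : s.countP (fun y => decide (y ≤ R - x) && !decide (y < L - x))
            = s.countP (pvP L R x) := by
          apply List.countP_congr
          intro y _
          simp [pvP]
          omega
        rw [hco] at hsplit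
        rw [hsplit]
        by_cases hx : pvP L R x x = true <;> simp [hx] <;> push_cast <;> ring
      rw [hmap, PySem.List.sum_map_add_int s (fun x => (s.countP (pvP L R x) : Int))
        (fun x => (if pvP L R x x then (-1:Int) else 0))]
      rw [sum_countP_eq (pvP L R) (pvP_symm L R) s]
      have hneg : (s.map (fun x => (if pvP L R x x then (-1:Int) else 0))).sum
          = -(s.countP (fun x => pvP L R x x) : Int) := by
        have hone := PySem.List.sum_map_ite_one_zero (fun x => pvP L R x x) s
        have h2 : s.map (fun x => (if pvP L R x x then (-1:Int) else 0))
            = s.map (fun x => -(if pvP L R x x then (1:Int) else 0)) := by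
          apply List.map_congr_left; intro x _; by_cases h : pvP L R x x = true <;> simp [h]
        have h3 : (s.map (fun x => -(if pvP L R x x then (1:Int) else 0))).sum
            = -((s.map (fun x => (if pvP L R x x then (1:Int) else 0))).sum) := by
          rw [List.sum_neg]
          simp [Function.comp_def]
        rw [h2, h3, hone]
      rw [hneg]
      rw [pairCount_perm (pvP L R) (pvP_symm L R) hperm]
      have hsum : (0:Int) + (2 * (pairCount (pvP L R) arr : Int) + (s.countP (fun x => pvP L R x x) : Int)
          + -(s.countP (fun x => pvP L R x x) : Int)) = 2 * (pairCount (pvP L R) arr : Int) := by ring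
      rw [hsum]
      simp [PySem.Int.floordiv, Int.mul_fdiv_cancel_left]
    · intro acc x _
      by_cases hx : L ≤ 2*x ∧ 2*x ≤ R
      · have hxx : pvP L R x x = true := by simp [pvP]; constructor <;> omega
        simp only [if_pos hx, hxx, if_true]
        ring
      · have hxx : pvP L R x x = false := by simp [pvP]; omega
        simp only [if_neg hx, hxx]
        simp

-- ===== VERDICT (by name: the statement is the Claim_ definition above) =====
theorem count_pairs_naive_spec : Claim_equal_count_pairs_naive := by
  intro arr L R _
  unfold Spec_count_pairs_naive
  rw [A_eq_pairCount, B_eq_pairCount]
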